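-- pv_equiv track=rewrite | github.com/jun981015/algorithm | programmers/86971.py | solution
-- ===== SOURCE A (Python) =====
-- def solution(n, wires):
--     tree = {i+1 : dict() for i in range(n)}
--     t = {i+1 : False for i in range(n)}
--     for i in wires:
--         tree[i[0]][i[1]]=0
--         tree[i[1]][i[0]]=0
--     def dfs(start):
--         t[start]=True #노드를 방문하면 true로
--         k=0 #k는 start 노드에의해 새로 연결되는 노드의 수
--         for next in tree[start]: #node와 연결되는 모든 간선 호출
--             if not t[next]: #연결되는 노드를 거치지 않았을때
--                 x=dfs(next)+1#dfs를 했으므로 노드 하나를 더 연결함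
--                 k+=x#next 간선을 통해 연결된 노드를 더함
--                 #ex start 7,next 8,9는 각각 1을 return 해주므로 k=3,dfs(7)은 3을 return함
--                 tree[start][next]=x
--         return k
--     dfs(1)
--     ans = 101
--     for node in tree:
--         for key in tree[node]:
--             ans = min(abs(n-tree[node][key]-tree[node][key]),ans)
--     return ans
-- ===== SOURCE B (Python) =====
-- def solution(n, wires):
--     # Adjacency lists (1-indexed), first-occurrence order, no duplicates
--     # (mirrors A's dict-key insertion semantics).
--     adj = [[] for _ in range(n + 1)]
--     for w in wires:
--         a, b = w[0], w[1]
--         if b not in adj[a]: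
--             adj[a].append(b)
--         if a not in adj[b]:
--             adj[b].append(a)
--     visited = [False] * (n + 1)
--     size = [0] * (n + 1)
--     visited[1] = True
--     # Iterative post-order DFS with an explicit stack of [node, next-child-index,
--     # accumulated subtree size]; no recursion.
--     stack = [[1, 0, 1]]
--     while stack:
--         v, i, s = stack[-1]
--         row = adj[v]
--         if i < len(row):
--             stack[-1][1] = i + 1
--             u = row[i]
--             if not visited[u]:
--                 visited[u] = True
--                 stack.append([u, 0, 1])
--         else:
--             stack.pop()
--             size[v] = s
--             if stack:
--                 stack[-1][2] += s
--     ans = 101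
--     for v in range(2, n + 1):
--         if visited[v]:
--             ans = min(ans, abs(n - 2 * size[v]))
--     return ans
-- ===== Notes on version B (the rewrite author's own statement) =====
-- stated objective: alternative
-- what changed: Replaces A's recursive DFS over a dict-of-dicts (subtree sizes written onto directed edge entries, then a double loop over every stored edge value) by a non-recursive explicit-stack post-order DFS over plain adjacency lists that fills a per-node subtree-size array, followed by a single loop over the nodes 2..n taking min(ans, |n - 2*size[v]|).
-- intended difference: On inputs with at least one wire but no wire joining node 1 to a different node (and n <= 100), A returns min(101, n) because the 0-initialized unused edge directions feed |n-0-0| into its minimum, while B returns 101 (the cap, meaning no split of the component of node 1 exists), which is the intended answer for a function that minimizes |size difference| over actual single-edge splits. — e.g. on solution(3, [[2, 3]]): A returns 3, B returns 101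
import Mathlib
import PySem

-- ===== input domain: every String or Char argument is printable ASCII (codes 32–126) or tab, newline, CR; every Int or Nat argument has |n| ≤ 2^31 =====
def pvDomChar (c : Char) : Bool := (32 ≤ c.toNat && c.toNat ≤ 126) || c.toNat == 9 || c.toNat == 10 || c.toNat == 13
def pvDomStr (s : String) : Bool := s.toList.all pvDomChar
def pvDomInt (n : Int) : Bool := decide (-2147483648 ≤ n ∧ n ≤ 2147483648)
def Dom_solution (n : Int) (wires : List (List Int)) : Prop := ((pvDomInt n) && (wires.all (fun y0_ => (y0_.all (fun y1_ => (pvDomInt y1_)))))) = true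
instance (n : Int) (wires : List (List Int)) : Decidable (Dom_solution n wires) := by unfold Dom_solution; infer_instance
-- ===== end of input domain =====

-- B replaces A's recursive DFS over a dict-of-dicts by a non-recursive explicit-stack
-- post-order DFS over adjacency lists with a per-node size array and a single node loop
-- (objective: alternative). The claim is about return values on Pre_ (endpoints in 1..n).

-- ===== PORT A =====
-- one iteration of A's 'for next in tree[start]' loop ('rec' is dfs at one less fuel)
def stepA (rec : Int → PySem.Dict Int (PySem.Dict Int Int) → PySem.Dict Int Bool →
      Int × PySem.Dict Int (PySem.Dict Int Int) × PySem.Dict Int Bool)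
    (start : Int)
    (acc : Int × PySem.Dict Int (PySem.Dict Int Int) × PySem.Dict Int Bool) (nxt : Int) :
    Int × PySem.Dict Int (PySem.Dict Int Int) × PySem.Dict Int Bool :=
  if acc.2.2.getD nxt false = false then
    let r := rec nxt acc.2.1 acc.2.2
    let x := r.1 + 1
    (acc.1 + x, r.2.1.insert start ((r.2.1.getD start PySem.Dict.empty).insert nxt x), r.2.2)
  else acc

-- A's recursive dfs. Python's recursion is not structural, so it gets a Nat fuel; with
-- fuel = n.toNat it never runs out (depth is bounded by the number of unvisited nodes,
-- see dfs_sim below), so this is A's computation step for step.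
def dfsA : Nat → Int → PySem.Dict Int (PySem.Dict Int Int) → PySem.Dict Int Bool →
    Int × PySem.Dict Int (PySem.Dict Int Int) × PySem.Dict Int Bool
  | 0, _, tree, t => (0, tree, t)
  | fuel+1, start, tree, t =>
      ((tree.getD start PySem.Dict.empty).keys).foldl (stepA (dfsA fuel) start)
        (0, tree, t.insert start true)

-- tree = {i+1: dict() ...}; then tree[i[0]][i[1]] = 0; tree[i[1]][i[0]] = 0 per wire
-- (list indexing i[0]/i[1] via pyGetD: exact, Pre_ keeps the length ≥ 2; dict writes at
-- keys 1..n only, which Pre_ guarantees exist, so getD/insert are exact here).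
def buildTreeA (n : Int) (wires : List (List Int)) : PySem.Dict Int (PySem.Dict Int Int) :=
  wires.foldl (fun tr w =>
      let a := PySem.List.pyGetD w 0 0
      let b := PySem.List.pyGetD w 1 0
      let tr1 := tr.insert a ((tr.getD a PySem.Dict.empty).insert b 0)
      tr1.insert b ((tr1.getD b PySem.Dict.empty).insert a 0))
    ((PySem.List.pyRange 0 n 1).foldl (fun d i => d.insert (i+1) PySem.Dict.empty) PySem.Dict.empty)

def solution (n : Int) (wires : List (List Int)) : Int :=
  let tree := buildTreeA n wires
  let t := (PySem.List.pyRange 0 n 1).foldl (fun d i => d.insert (i+1) false)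
      (PySem.Dict.empty : PySem.Dict Int Bool)
  let r := dfsA n.toNat 1 tree t
  let tree2 := r.2.1
  tree2.keys.foldl (fun ans node =>
    ((tree2.getD node PySem.Dict.empty).keys).foldl (fun ans key =>
      min |n - (tree2.getD node PySem.Dict.empty).getD key 0
            - (tree2.getD node PySem.Dict.empty).getD key 0| ans) ans) 101

-- ===== PORT B =====
-- adjacency lists; indices a, b are in 1..n inside Pre_, so .toNat is exact (no negatives)
def buildAdj (n : Int) (wires : List (List Int)) : List (List Int) :=
  wires.foldl (fun adj w =>
      let a := PySem.List.pyGetD w 0 0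
      let b := PySem.List.pyGetD w 1 0
      let adj1 := if (adj.getD a.toNat []).contains b then adj
                  else adj.set a.toNat ((adj.getD a.toNat []) ++ [b])
      if (adj1.getD b.toNat []).contains a then adj1
      else adj1.set b.toNat ((adj1.getD b.toNat []) ++ [a]))
    (List.replicate (n + 1).toNat [])

def nodesUpTo (n' : Nat) : List Int := (List.range n').map (fun i : Nat => ((i : Int) + 1))

-- fuel for B's while loop (a pure totality guard for the Lean port; Source B just loops):
-- one unit per eventual pop plus one per neighbour inspection of every still-unvisited node;
-- psi_mark / inner_sim below prove it is never exhausted.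
def psi (adj : List (List Int)) (vis : List Bool) (l : List Int) : Nat :=
  l.foldl (fun s x => if vis.getD x.toNat false then s
                      else s + (adj.getD x.toNat []).length + 1) 0

-- B's while loop over the explicit stack of (node, next-child-index, accumulated size)
-- frames, transcribed step for step (advance / push / pop are Source B's three branches).
def runStack (adj : List (List Int)) : Nat → List (Int × Nat × Int) → List Bool → List Int →
    List Bool × List Int
  | 0, _, vis, size => (vis, size)
  | _+1, [], vis, size => (vis, size)
  | fuel+1, (v, i, s) :: rest, vis, size =>
    if i < (adj.getD v.toNat []).length then
      let u := (adj.getD v.toNat []).getD i 0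
      if vis.getD u.toNat false then runStack adj fuel ((v, i+1, s) :: rest) vis size
      else runStack adj fuel ((u, 0, 1) :: (v, i+1, s) :: rest) (vis.set u.toNat true) size
    else
      match rest with
      | [] => (vis, size.set v.toNat s)
      | (p, j, t) :: rest' => runStack adj fuel ((p, j, t + s) :: rest') vis (size.set v.toNat s)

def solution_alt (n : Int) (wires : List (List Int)) : Int :=
  let adj := buildAdj n wires
  let vis0 := List.replicate (n + 1).toNat false
  let r := runStack adj (psi adj vis0 (nodesUpTo n.toNat)) [(1, 0, 1)]
      (vis0.set (1 : Int).toNat true) (List.replicate (n + 1).toNat 0)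
  (PySem.List.pyRange 2 (n + 1) 1).foldl (fun ans v =>
    if r.1.getD v.toNat false then min ans |n - 2 * r.2.getD v.toNat 0| else ans) 101

-- ===== PRECONDITION & SPEC =====
-- Exactly where the Python A returns: n ≥ 1 (else dfs(1) raises KeyError), every wire has at
-- least two entries (else IndexError) and both endpoints in 1..n (else KeyError).
def Pre_solution (n : Int) (wires : List (List Int)) : Prop :=
  1 ≤ n ∧ ∀ w ∈ wires, 2 ≤ w.length ∧
    (1 ≤ PySem.List.pyGetD w 0 0 ∧ PySem.List.pyGetD w 0 0 ≤ n) ∧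
    (1 ≤ PySem.List.pyGetD w 1 0 ∧ PySem.List.pyGetD w 1 0 ≤ n)
instance (n : Int) (wires : List (List Int)) : Decidable (Pre_solution n wires) := by
  unfold Pre_solution; infer_instance

def pvWitness_solution : Int × List (List Int) := (2, [[1, 2]])

-- On inputs with at least one wire but no wire joining node 1 to a different node (and n ≤ 100),
-- A returns min(101, n) — its 0-initialized unused edge directions feed |n-0-0| into the minimum —
-- while B returns the cap 101 ("no split exists"), the intended value for a minimum over actual splits.
def D_solution (n : Int) (wires : List (List Int)) : Prop :=
  wires ≠ [] ∧ n ≤ 100 ∧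
    ∀ w ∈ wires, (PySem.List.pyGetD w 0 0 = 1 ↔ PySem.List.pyGetD w 1 0 = 1)
instance (n : Int) (wires : List (List Int)) : Decidable (D_solution n wires) := by
  unfold D_solution; infer_instance

def Spec_solution (n : Int) (wires : List (List Int)) (out : Int) : Prop :=
  ¬ D_solution n wires → out = solution_alt n wires
instance (n : Int) (wires : List (List Int)) (out : Int) : Decidable (Spec_solution n wires out) := by
  unfold Spec_solution; infer_instance

def pvDiffWitness_solution : Int × List (List Int) := (3, [[2, 3]])
def pvDiffWitnessOut_solution : Int × Int := (3, 101)

-- ===== CLAIM (what is proved, stated in full; the proofs are below) =====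
def Claim_unchanged_solution : Prop := ∀ (n : Int) (wires : List (List Int)),
  Dom_solution n wires → Pre_solution n wires → Spec_solution n wires (solution n wires)
def Claim_changed_solution : Prop :=
  Dom_solution (pvDiffWitness_solution.1) (pvDiffWitness_solution.2) ∧
  Pre_solution (pvDiffWitness_solution.1) (pvDiffWitness_solution.2) ∧
  D_solution (pvDiffWitness_solution.1) (pvDiffWitness_solution.2) ∧
  solution (pvDiffWitness_solution.1) (pvDiffWitness_solution.2) = pvDiffWitnessOut_solution.1 ∧
  solution_alt (pvDiffWitness_solution.1) (pvDiffWitness_solution.2) = pvDiffWitnessOut_solution.2 ∧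
  pvDiffWitnessOut_solution.1 ≠ pvDiffWitnessOut_solution.2
def Claim_exact_solution : Prop := ∀ (n : Int) (wires : List (List Int)),
  Dom_solution n wires → Pre_solution n wires → D_solution n wires →
  solution n wires ≠ solution_alt n wires

-- ===== LEMMAS AND PROOFS =====

-- The recursive reference DFS for B's stack machine (proof-only: frame_sim/inner_sim below
-- show runStack computes exactly its visited/size output; dfs_sim then relates it to A).
def stepB (rec : Int → List Bool → List Int → Int × List Bool × List Int)
    (acc : Int × List Bool × List Int) (u : Int) : Int × List Bool × List Int :=
  if acc.2.1.getD u.toNat false = false then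
    let r := rec u acc.2.1 acc.2.2
    (acc.1 + r.1, r.2)
  else acc

def dfsB (adj : List (List Int)) : Nat → Int → List Bool → List Int → Int × List Bool × List Int
  | 0, _, visited, size => (0, visited, size)
  | fuel+1, v, visited, size =>
      let r := (adj.getD v.toNat []).foldl (stepB (dfsB adj fuel)) (1, visited.set v.toNat true, size)
      (r.1, r.2.1, r.2.2.set v.toNat r.1)

-- the value A stores on the directed edge u → v (0 when absent)
def Entry (tree : PySem.Dict Int (PySem.Dict Int Int)) (u v : Int) : Int :=
  (tree.getD u PySem.Dict.empty).getD v 0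

-- number of still-unvisited nodes (drives the fuel bookkeeping)
def UC (n' : Nat) (t : PySem.Dict Int Bool) : Nat :=
  (nodesUpTo n').countP (fun v => !(t.getD v false))

-- the coupling between A's state (tree, t) and B's state (visited, size)
def SRel (n : Int) (adj : List (List Int)) (tree : PySem.Dict Int (PySem.Dict Int Int))
    (t : PySem.Dict Int Bool) (visited : List Bool) (size : List Int) : Prop :=
  tree.keys = nodesUpTo n.toNat ∧
  (∀ u : Int, (tree.getD u PySem.Dict.empty).keys = adj.getD u.toNat []) ∧
  (∀ u : Int, t.getD u false = visited.getD u.toNat false) ∧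
  visited.length = n.toNat + 1 ∧
  size.length = n.toNat + 1 ∧
  (∀ u v : Int, Entry tree u v ≠ 0 → t.getD v false = true ∧ Entry tree u v = size.getD v.toNat 0)

def Adm (n : Int) (adj : List (List Int)) : Prop :=
  1 ≤ n ∧ ∀ u : Int, ∀ x ∈ adj.getD u.toNat [], 1 ≤ x ∧ x ≤ n

-- what one dfs call guarantees about the change of state
def Post (n : Int) (tree : PySem.Dict Int (PySem.Dict Int Int)) (t : PySem.Dict Int Bool)
    (size : List Int) (start kA : Int) (treeA : PySem.Dict Int (PySem.Dict Int Int))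
    (tA : PySem.Dict Int Bool) (sB : Int) (sizeB : List Int) : Prop :=
  kA + 1 = sB ∧
  tA.getD start false = true ∧
  (∀ u, t.getD u false = true → tA.getD u false = true) ∧
  (∀ u v, Entry tree u v ≠ 0 → Entry treeA u v = Entry tree u v) ∧
  (∀ u v, Entry treeA u v ≠ 0 → Entry tree u v ≠ 0 ∨ (t.getD v false = false ∧ v ≠ start)) ∧
  (∀ v, t.getD v false = true → sizeB.getD v.toNat 0 = size.getD v.toNat 0) ∧
  (∀ v, tA.getD v false = true →
      t.getD v false = true ∨ v = start ∨ ∃ u, Entry treeA u v ≠ 0 ∧ Entry tree u v = 0) ∧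
  (∀ v, tA.getD v false = true →
      t.getD v false = true ∨ (1 ≤ sizeB.getD v.toNat 0 ∧ sizeB.getD v.toNat 0 ≤ n)) ∧
  1 ≤ sB ∧
  sB + (UC n.toNat tA : Int) ≤ (UC n.toNat t : Int) ∧
  sizeB.getD start.toNat 0 = sB

theorem mem_nodesUpTo (n' : Nat) (v : Int) : v ∈ nodesUpTo n' ↔ 1 ≤ v ∧ v ≤ (n' : Int) := by
  unfold nodesUpTo
  rw [List.mem_map]
  constructor
  · rintro ⟨i, hi, rfl⟩; rw [List.mem_range] at hi; omega
  · rintro ⟨h1, h2⟩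
    refine ⟨(v - 1).toNat, ?_, by omega⟩
    rw [List.mem_range]; omega

theorem UC_pos (n : Int) (t : PySem.Dict Int Bool) (s : Int) (h1 : 1 ≤ s) (h2 : s ≤ n)
    (hu : t.getD s false = false) : 0 < UC n.toNat t := by
  unfold UC
  rw [List.countP_pos_iff]
  exact ⟨s, (mem_nodesUpTo _ _).2 ⟨h1, by omega⟩, by simp [hu]⟩

theorem countP_succ_le (l : List Int) (p p' : Int → Bool)
    (himp : ∀ v ∈ l, p' v = true → p v = true) (s : Int) (hs : s ∈ l)
    (hps : p s = true) (hps' : p' s = false) : l.countP p' + 1 ≤ l.countP p := by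
  induction l with
  | nil => cases hs
  | cons a l ih =>
    simp only [List.countP_cons]
    rcases List.mem_cons.mp hs with rfl | hs'
    · have hle : l.countP p' ≤ l.countP p :=
        List.countP_mono_left (fun v hv => himp v (List.mem_cons_of_mem _ hv))
      rw [hps, hps']; simp; omega
    · have := ih (fun v hv => himp v (List.mem_cons_of_mem _ hv)) hs'
      cases hpa : p' a
      · cases hqa : p a <;> simp <;> omega
      · rw [himp a List.mem_cons_self hpa]; simp; omega

theorem UC_mark (n : Int) (t : PySem.Dict Int Bool) (s : Int) (h1 : 1 ≤ s) (h2 : s ≤ n)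
    (hu : t.getD s false = false) : UC n.toNat (t.insert s true) + 1 ≤ UC n.toNat t := by
  unfold UC
  refine countP_succ_le _ _ _ ?_ s ((mem_nodesUpTo _ _).2 ⟨h1, by omega⟩)
      (by simp [hu]) (by simp)
  intro v _ hv
  rw [PySem.Dict.getD_insert] at hv
  by_cases h : v = s
  · simp [h] at hv
  · simpa [h] using hv

theorem Entry_insert (treeA : PySem.Dict Int (PySem.Dict Int Int)) (start x val u v : Int) :
    Entry (treeA.insert start ((treeA.getD start PySem.Dict.empty).insert x val)) u v =
    if u = start ∧ v = x then val else Entry treeA u v := by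
  unfold Entry
  rw [PySem.Dict.getD_insert]
  by_cases h1 : u = start
  · subst h1
    rw [if_pos rfl, PySem.Dict.getD_insert]
    by_cases h2 : v = x
    · simp [h2]
    · simp [h2]
  · simp [h1]

theorem getD_set_toNat_ne {α : Type} (l : List α) (s v : Int) (h1 : 1 ≤ s) (hne : v ≠ s)
    (x d : α) : (l.set s.toNat x).getD v.toNat d = l.getD v.toNat d := by
  have : s.toNat ≠ v.toNat := by omega
  rw [List.getD_eq_getElem?_getD, List.getD_eq_getElem?_getD, List.getElem?_set_ne this]

theorem getD_set_self {α : Type} (l : List α) (i : Nat) (h : i < l.length) (x d : α) :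
    (l.set i x).getD i d = x := by
  rw [List.getD_eq_getElem?_getD, List.getElem?_set_self h]; rfl

-- everything one pass of the neighbour loop preserves / produces, relative to the state
-- (tree, t, size) at the start of the loop; ra/rb are the two loops' results
def LoopOut (n : Int) (adj : List (List Int)) (tree : PySem.Dict Int (PySem.Dict Int Int))
    (t : PySem.Dict Int Bool) (size : List Int) (L : List Int) (kacc : Int)
    (ra : Int × PySem.Dict Int (PySem.Dict Int Int) × PySem.Dict Int Bool)
    (rb : Int × List Bool × List Int) : Prop :=
  ra.1 + 1 = rb.1 ∧
  SRel n adj ra.2.1 ra.2.2 rb.2.1 rb.2.2 ∧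
  kacc ≤ ra.1 ∧
  (∀ u, t.getD u false = true → ra.2.2.getD u false = true) ∧
  (∀ u v, Entry tree u v ≠ 0 → Entry ra.2.1 u v = Entry tree u v) ∧
  (∀ u v, Entry ra.2.1 u v ≠ 0 → Entry tree u v ≠ 0 ∨ t.getD v false = false) ∧
  (∀ v, t.getD v false = true → rb.2.2.getD v.toNat 0 = size.getD v.toNat 0) ∧
  (∀ v, ra.2.2.getD v false = true →
      t.getD v false = true ∨ ∃ u, Entry ra.2.1 u v ≠ 0 ∧ Entry tree u v = 0) ∧
  (∀ v, ra.2.2.getD v false = true →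
      t.getD v false = true ∨ (1 ≤ rb.2.2.getD v.toNat 0 ∧ rb.2.2.getD v.toNat 0 ≤ n)) ∧
  (ra.1 - kacc) + (UC n.toNat ra.2.2 : Int) ≤ (UC n.toNat t : Int) ∧
  (∀ x ∈ L, ra.2.2.getD x false = true)

theorem loop_sim (n : Int) (adj : List (List Int)) (hadm : Adm n adj) (fuel : Nat)
    (IH : ∀ (start : Int) (tree : PySem.Dict Int (PySem.Dict Int Int)) (t : PySem.Dict Int Bool)
        (visited : List Bool) (size : List Int),
      SRel n adj tree t visited size → 1 ≤ start → start ≤ n →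
      t.getD start false = false → UC n.toNat t ≤ fuel →
      SRel n adj (dfsA fuel start tree t).2.1 (dfsA fuel start tree t).2.2
          (dfsB adj fuel start visited size).2.1 (dfsB adj fuel start visited size).2.2 ∧
      Post n tree t size start (dfsA fuel start tree t).1 (dfsA fuel start tree t).2.1
          (dfsA fuel start tree t).2.2 (dfsB adj fuel start visited size).1
          (dfsB adj fuel start visited size).2.2 ∧
      (∀ x ∈ adj.getD start.toNat [], (dfsA fuel start tree t).2.2.getD x false = true)) :
    ∀ (L : List Int) (start : Int) (tree : PySem.Dict Int (PySem.Dict Int Int))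
      (t : PySem.Dict Int Bool) (visited : List Bool) (size : List Int) (kacc : Int),
      SRel n adj tree t visited size →
      1 ≤ start → start ≤ n →
      (∀ x ∈ L, x ∈ adj.getD start.toNat []) →
      t.getD start false = true →
      UC n.toNat t ≤ fuel →
      LoopOut n adj tree t size L kacc
        (L.foldl (stepA (dfsA fuel) start) (kacc, tree, t))
        (L.foldl (stepB (dfsB adj fuel)) (kacc + 1, visited, size)) := by
  intro L
  induction L with
  | nil =>
    intro start tree t visited size kacc hrel _ _ _ _ _
    unfold LoopOut
    exact ⟨rfl, hrel, le_refl _, fun u h => h, fun u v _ => rfl, fun u v h => Or.inl h,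
      fun v _ => rfl, fun v h => Or.inl h, fun v h => Or.inl h,
      by simp only [List.foldl_nil]; omega,
      fun x hx => absurd hx (List.not_mem_nil)⟩
  | cons x L ih =>
    intro start tree t visited size kacc hrel hs1 hs2 hmem hstart hfuel
    obtain ⟨hK1, hK2, hV, hL1, hL2, hE⟩ := hrel
    have hxadj : x ∈ adj.getD start.toNat [] := hmem x (List.mem_cons_self)
    have hxb : 1 ≤ x ∧ x ≤ n := hadm.2 start x hxadj
    simp only [List.foldl_cons, stepA, stepB]
    by_cases hvx : t.getD x false = false
    · -- x not yet visited: both sides recurse into it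
      rw [if_pos (by exact hvx), if_pos (by rw [← hV x]; exact hvx)]
      obtain ⟨RelP, PostP, NBP⟩ :=
        IH x tree t visited size ⟨hK1, hK2, hV, hL1, hL2, hE⟩ hxb.1 hxb.2 hvx hfuel
      obtain ⟨PkA, Ptx, Pmono, Pstab, Pnew, Psz, Pcomp, Psc, PsB, Puc, Pszx⟩ := PostP
      obtain ⟨RK1, RK2, RV, RL1, RL2, RE⟩ := RelP
      set kA := (dfsA fuel x tree t).1 with hkA
      set treeA := (dfsA fuel x tree t).2.1 with htreeA
      set tA := (dfsA fuel x tree t).2.2 with htA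
      set sB := (dfsB adj fuel x visited size).1 with hsB
      set visB := (dfsB adj fuel x visited size).2.1 with hvisB
      set sizeB := (dfsB adj fuel x visited size).2.2 with hsizeB
      set treeW := treeA.insert start ((treeA.getD start PySem.Dict.empty).insert x (kA + 1))
        with htreeW
      -- Entry of treeW
      have hEW : ∀ u v, Entry treeW u v = if u = start ∧ v = x then kA + 1 else Entry treeA u v :=
        fun u v => Entry_insert treeA start x (kA + 1) u v
      have hExz : Entry tree start x = 0 := by
        by_contra h
        exact absurd (hE start x h).1 (by simp [hvx])
      -- keys facts for treeW
      have hstartmem : start ∈ treeA.keys := by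
        rw [RK1]; exact (mem_nodesUpTo _ _).2 ⟨hs1, by omega⟩
      have hWK1 : treeW.keys = nodesUpTo n.toNat := by
        rw [htreeW, PySem.Dict.keys_insert_of_contains _ _
          ((PySem.Dict.contains_iff_mem_keys _ _).2 hstartmem)]
        exact RK1
      have hxkeys : x ∈ (treeA.getD start PySem.Dict.empty).keys := by
        rw [RK2 start]; exact hxadj
      have hWK2 : ∀ u : Int, (treeW.getD u PySem.Dict.empty).keys = adj.getD u.toNat [] := by
        intro u
        rw [htreeW, PySem.Dict.getD_insert]
        by_cases hu : u = start
        · rw [if_pos hu, PySem.Dict.keys_insert_of_contains _ _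
            ((PySem.Dict.contains_iff_mem_keys _ _).2 hxkeys), RK2 start, hu]
        · rw [if_neg hu]; exact RK2 u
      have hWE : ∀ u v : Int, Entry treeW u v ≠ 0 →
          tA.getD v false = true ∧ Entry treeW u v = sizeB.getD v.toNat 0 := by
        intro u v h
        rw [hEW] at h ⊢
        by_cases huv : u = start ∧ v = x
        · rw [if_pos huv] at h ⊢
          exact ⟨huv.2 ▸ Ptx, by rw [huv.2, Pszx, PkA]⟩
        · rw [if_neg huv] at h ⊢
          exact RE u v h
      have hrelW : SRel n adj treeW tA visB sizeB := ⟨hWK1, hWK2, RV, RL1, RL2, hWE⟩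
      have hucA : UC n.toNat tA ≤ fuel := by omega
      have hres := ih start treeW tA visB sizeB (kacc + (kA + 1)) hrelW hs1 hs2
        (fun y hy => hmem y (List.mem_cons_of_mem _ hy)) (Pmono start hstart) hucA
      unfold LoopOut at hres
      obtain ⟨Q1, Q2, Q3, Q4, Q5, Q6, Q7, Q8, Q9, Q10, Q11⟩ := hres
      unfold LoopOut
      have hacc : kacc + 1 + sB = kacc + (kA + 1) + 1 := by omega
      rw [hacc]
      set ra := L.foldl (stepA (dfsA fuel) start) (kacc + (kA + 1), treeW, tA) with hra
      set rb := L.foldl (stepB (dfsB adj fuel)) (kacc + (kA + 1) + 1, visB, sizeB) with hrb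
      refine ⟨Q1, Q2, by omega, ?_, ?_, ?_, ?_, ?_, ?_, ?_, ?_⟩
      · exact fun u h => Q4 u (Pmono u h)
      · -- stability
        intro u v h
        have h2 : Entry treeA u v = Entry tree u v := Pstab u v h
        have huv : ¬(u = start ∧ v = x) := by
          rintro ⟨rfl, rfl⟩; exact h hExz
        have h3 : Entry treeW u v = Entry tree u v := by rw [hEW, if_neg huv, h2]
        rw [Q5 u v (by rw [h3]; exact h), h3]
      · -- new entries only to previously unvisited nodes
        intro u v h
        rcases Q6 u v h with h1 | h1
        · rw [hEW] at h1
          by_cases huv : u = start ∧ v = x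
          · right; rw [huv.2]; exact hvx
          · rw [if_neg huv] at h1
            rcases Pnew u v h1 with h2 | h2
            · exact Or.inl h2
            · exact Or.inr h2.1
        · right
          by_contra h2
          simp only [Bool.not_eq_false] at h2
          exact absurd (Pmono v h2) (by simp [h1])
      · -- size stability for already-visited nodes
        intro v hv
        rw [Q7 v (Pmono v hv), Psz v hv]
      · -- completeness: every newly visited node has a fresh nonzero entry
        intro v hv
        rcases Q8 v hv with h1 | h1
        · rcases Pcomp v h1 with h2 | h2 | h2
          · exact Or.inl h2
          · right
            refine ⟨start, ?_, by rw [h2]; exact hExz⟩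
            have hWx : Entry treeW start v ≠ 0 := by
              rw [hEW, if_pos ⟨rfl, h2⟩]; omega
            rw [Q5 start v hWx]; exact hWx
          · obtain ⟨u, hu1, hu2⟩ := h2
            right
            refine ⟨u, ?_, hu2⟩
            have hWx : Entry treeW u v ≠ 0 := by
              rw [hEW]
              by_cases huv : u = start ∧ v = x
              · rw [if_pos huv]; omega
              · rw [if_neg huv]; exact hu1
            rw [Q5 u v hWx]; exact hWx
        · obtain ⟨u, hu1, hu2⟩ := h1
          right
          refine ⟨u, hu1, ?_⟩
          by_contra h2
          have h3 : Entry treeA u v = Entry tree u v := Pstab u v h2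
          have : Entry treeW u v ≠ 0 := by
            rw [hEW]
            by_cases huv : u = start ∧ v = x
            · rw [if_pos huv]; omega
            · rw [if_neg huv, h3]; exact h2
          exact this hu2
      · -- size correctness for newly visited nodes
        intro v hv
        rcases Q9 v hv with h1 | h1
        · rcases Psc v h1 with h2 | h2
          · exact Or.inl h2
          · right; rw [Q7 v h1]; exact h2
        · exact Or.inr h1
      · omega
      · intro y hy
        rcases List.mem_cons.mp hy with rfl | hy'
        · exact Q4 y Ptx
        · exact Q11 y hy'
    · -- x already visited: both sides skip
      rw [if_neg hvx, if_neg (by rw [← hV x]; exact hvx)]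
      have hres := ih start tree t visited size kacc ⟨hK1, hK2, hV, hL1, hL2, hE⟩ hs1 hs2
        (fun y hy => hmem y (List.mem_cons_of_mem _ hy)) hstart hfuel
      unfold LoopOut at hres
      obtain ⟨Q1, Q2, Q3, Q4, Q5, Q6, Q7, Q8, Q9, Q10, Q11⟩ := hres
      unfold LoopOut
      refine ⟨Q1, Q2, Q3, Q4, Q5, Q6, Q7, Q8, Q9, Q10, ?_⟩
      intro y hy
      rcases List.mem_cons.mp hy with rfl | hy'
      · exact Q4 y (by simpa using hvx)
      · exact Q11 y hy'

theorem dfs_sim (n : Int) (adj : List (List Int)) (hadm : Adm n adj) :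
    ∀ fuel : Nat, ∀ (start : Int) (tree : PySem.Dict Int (PySem.Dict Int Int))
      (t : PySem.Dict Int Bool) (visited : List Bool) (size : List Int),
    SRel n adj tree t visited size →
    1 ≤ start → start ≤ n →
    t.getD start false = false →
    UC n.toNat t ≤ fuel →
    SRel n adj (dfsA fuel start tree t).2.1 (dfsA fuel start tree t).2.2
        (dfsB adj fuel start visited size).2.1 (dfsB adj fuel start visited size).2.2 ∧
    Post n tree t size start (dfsA fuel start tree t).1 (dfsA fuel start tree t).2.1
        (dfsA fuel start tree t).2.2 (dfsB adj fuel start visited size).1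
        (dfsB adj fuel start visited size).2.2 ∧
    (∀ x ∈ adj.getD start.toNat [], (dfsA fuel start tree t).2.2.getD x false = true) := by
  intro fuel
  induction fuel with
  | zero =>
    intro start tree t visited size hrel h1 h2 hun hfuel
    have := UC_pos n t start h1 h2 hun
    omega
  | succ fuel ih =>
    intro start tree t visited size hrel h1 h2 hun hfuel
    obtain ⟨hK1, hK2, hV, hL1, hL2, hE⟩ := hrel
    have hsnat : start.toNat < visited.length := by rw [hL1]; omega
    have ht1 : (t.insert start true).getD start false = true := by
      rw [PySem.Dict.getD_insert, if_pos rfl]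
    have hmark : ∀ u : Int, (t.insert start true).getD u false =
        (visited.set start.toNat true).getD u.toNat false := by
      intro u
      rw [PySem.Dict.getD_insert]
      by_cases hu : u = start
      · rw [if_pos hu, hu, getD_set_self _ _ hsnat]
      · rw [if_neg hu, getD_set_toNat_ne _ _ _ h1 hu, hV u]
    have hmark2 : ∀ u : Int, t.getD u false = true → (t.insert start true).getD u false = true := by
      intro u hu
      rw [PySem.Dict.getD_insert]
      by_cases h : u = start <;> simp [h, hu]
    have hrel1 : SRel n adj tree (t.insert start true) (visited.set start.toNat true) size := by
      refine ⟨hK1, hK2, hmark, by rw [List.length_set]; exact hL1, hL2, ?_⟩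
      intro u v h
      exact ⟨hmark2 v (hE u v h).1, (hE u v h).2⟩
    have hUCm : UC n.toNat (t.insert start true) + 1 ≤ UC n.toNat t :=
      UC_mark n t start h1 h2 hun
    have hUC1 : UC n.toNat (t.insert start true) ≤ fuel := by omega
    have hres := loop_sim n adj hadm fuel ih ((tree.getD start PySem.Dict.empty).keys) start
      tree (t.insert start true) (visited.set start.toNat true) size 0 hrel1 h1 h2
      (by rw [hK2 start]; exact fun x hx => hx) ht1 hUC1
    rw [zero_add] at hres
    unfold LoopOut at hres
    obtain ⟨Q1, Q2, Q3, Q4, Q5, Q6, Q7, Q8, Q9, Q10, Q11⟩ := hres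
    obtain ⟨RK1, RK2, RV, RL1, RL2, RE⟩ := Q2
    simp only [dfsA, dfsB]
    rw [← hK2 start]
    set L := (tree.getD start PySem.Dict.empty).keys with hL
    set ra := L.foldl (stepA (dfsA fuel) start) (0, tree, t.insert start true) with hra
    set rb := L.foldl (stepB (dfsB adj fuel)) (1, visited.set start.toNat true, size) with hrb
    have hUCle : UC n.toNat t ≤ n.toNat := by
      unfold UC
      calc (nodesUpTo n.toNat).countP _ ≤ (nodesUpTo n.toNat).length := List.countP_le_length
      _ = n.toNat := by simp [nodesUpTo]
    have hnoStart : ∀ u, Entry ra.2.1 u start = 0 := by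
      intro u
      by_contra h
      rcases Q6 u start h with h1 | h1
      · exact absurd (hE u start h1).1 (by simp [hun])
      · rw [ht1] at h1; exact absurd h1 (by simp)
    have hsnat2 : start.toNat < rb.2.2.length := by rw [RL2]; omega
    have hszF : ∀ v : Int, v ≠ start →
        (rb.2.2.set start.toNat rb.1).getD v.toNat 0 = rb.2.2.getD v.toNat 0 :=
      fun v hv => getD_set_toNat_ne _ _ _ h1 hv _ _
    have hszFs : (rb.2.2.set start.toNat rb.1).getD start.toNat 0 = rb.1 :=
      getD_set_self _ _ hsnat2 _ _
    have hn' : ((n.toNat : Int)) = n := by omega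
    refine ⟨⟨RK1, RK2, RV, RL1, by rw [List.length_set]; exact RL2, ?_⟩,
        ⟨Q1, Q4 start ht1, fun u hu => Q4 u (hmark2 u hu), ?_, ?_, ?_, ?_, ?_, by omega, ?_, ?_⟩,
        Q11⟩
    · -- E1' with the final size write at start
      intro u v h
      have h2 := RE u v h
      by_cases hv : v = start
      · exact absurd (hv ▸ h) (by simp [hnoStart u])
      · exact ⟨h2.1, by rw [hszF v hv]; exact h2.2⟩
    · -- entry stability
      intro u v h
      exact Q5 u v h
    · -- new entries
      intro u v h
      rcases Q6 u v h with h1 | h1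
      · exact Or.inl h1
      · right
        rw [PySem.Dict.getD_insert] at h1
        by_cases hv : v = start
        · rw [if_pos hv] at h1; exact absurd h1 (by simp)
        · rw [if_neg hv] at h1; exact ⟨h1, hv⟩
    · -- size stability
      intro v hv
      have hvs : v ≠ start := by rintro rfl; rw [hun] at hv; exact absurd hv (by simp)
      rw [hszF v hvs]
      exact Q7 v (hmark2 v hv)
    · -- completeness
      intro v hv
      rcases Q8 v hv with h1 | h1
      · rw [PySem.Dict.getD_insert] at h1
        by_cases hvs : v = start
        · exact Or.inr (Or.inl hvs)
        · rw [if_neg hvs] at h1; exact Or.inl h1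
      · exact Or.inr (Or.inr h1)
    · -- size correctness for newly visited
      intro v hv
      by_cases hvs : v = start
      · right
        subst hvs
        rw [hszFs]
        constructor
        · omega
        · rw [← Q1]; omega
      · rcases Q9 v hv with h1 | h1
        · rw [PySem.Dict.getD_insert, if_neg hvs] at h1
          exact Or.inl h1
        · right; rw [hszF v hvs]; exact h1
    · -- fuel / unvisited-count accounting
      omega
    · exact hszFs

-- ---- the initial structures ----

theorem getD_replicate_same {α : Type} (m i : Nat) (c : α) :
    (List.replicate m c).getD i c = c := by
  rw [List.getD_eq_getElem?_getD]
  by_cases h : i < m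
  · rw [List.getElem?_eq_getElem (by simpa using h)]
    simp
  · rw [List.getElem?_eq_none (by simpa using h)]
    rfl

theorem t0_getD (l : List Int) (d : PySem.Dict Int Bool) (h : ∀ u, d.getD u false = false) :
    ∀ u : Int, (l.foldl (fun d i => d.insert (i + 1) false) d).getD u false = false := by
  induction l generalizing d with
  | nil => exact h
  | cons a l ih =>
    rw [List.foldl_cons]
    apply ih
    intro u
    rw [PySem.Dict.getD_insert]
    by_cases hu : u = a + 1 <;> simp [hu, h u]

theorem tree0_getD (l : List Int) (d : PySem.Dict Int (PySem.Dict Int Int))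
    (h : ∀ u, d.getD u PySem.Dict.empty = PySem.Dict.empty) :
    ∀ u : Int, (l.foldl (fun d i => d.insert (i + 1) PySem.Dict.empty) d).getD u
      PySem.Dict.empty = PySem.Dict.empty := by
  induction l generalizing d with
  | nil => exact h
  | cons a l ih =>
    rw [List.foldl_cons]
    apply ih
    intro u
    rw [PySem.Dict.getD_insert]
    by_cases hu : u = a + 1 <;> simp [hu, h u]

theorem keys_fold_insert_empty (l : List Int) (d : PySem.Dict Int (PySem.Dict Int Int))
    (hfresh : ∀ i ∈ l, d.contains (i + 1) = false)
    (hnd : (l.map (fun i : Int => i + 1)).Nodup) :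
    (l.foldl (fun d i => d.insert (i + 1) PySem.Dict.empty) d).keys
      = d.keys ++ l.map (fun i : Int => i + 1) := by
  induction l generalizing d with
  | nil => simp
  | cons a l ih =>
    rw [List.foldl_cons, List.map_cons]
    rw [List.map_cons, List.nodup_cons] at hnd
    rw [ih _ ?_ hnd.2]
    · rw [PySem.Dict.keys_insert_of_not_contains _ _ (hfresh a List.mem_cons_self)]
      simp
    · intro i hi
      rw [PySem.Dict.contains_insert]
      have h1 : (i + 1 == a + 1) = false := by
        simp only [beq_eq_false_iff_ne, ne_eq]
        intro h
        exact hnd.1 (h ▸ List.mem_map_of_mem hi)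
      rw [h1, hfresh i (List.mem_cons_of_mem _ hi)]
      rfl

theorem nodesUpTo_nodup (n' : Nat) : (nodesUpTo n').Nodup := by
  unfold nodesUpTo
  exact (List.nodup_range).map (fun i j h => by omega)

theorem pyRange_map_succ (n : Int) (hn : 0 ≤ n) :
    (PySem.List.pyRange 0 n 1).map (fun i : Int => i + 1) = nodesUpTo n.toNat := by
  conv_lhs => rw [show n = ((n.toNat : Int)) by omega]
  rw [PySem.List.pyRange_zero_natCast, List.map_map]
  rfl

-- ---- building the edge structures in lockstep ----

def trStep (tr : PySem.Dict Int (PySem.Dict Int Int)) (a b : Int) :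
    PySem.Dict Int (PySem.Dict Int Int) :=
  tr.insert a ((tr.getD a PySem.Dict.empty).insert b 0)

def adStep (ad : List (List Int)) (a b : Int) : List (List Int) :=
  if (ad.getD a.toNat []).contains b then ad
  else ad.set a.toNat ((ad.getD a.toNat []) ++ [b])

theorem half_step (n : Int) (tr : PySem.Dict Int (PySem.Dict Int Int)) (ad : List (List Int))
    (a b : Int) (ha1 : 1 ≤ a) (ha2 : a ≤ n) (hb1 : 1 ≤ b) (hb2 : b ≤ n)
    (hkeys : tr.keys = nodesUpTo n.toNat)
    (hK : ∀ u : Int, (tr.getD u PySem.Dict.empty).keys = ad.getD u.toNat [])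
    (hlen : ad.length = n.toNat + 1)
    (hzero : ∀ u v : Int, Entry tr u v = 0)
    (hbnd : ∀ u : Int, ∀ x ∈ ad.getD u.toNat [], 1 ≤ x ∧ x ≤ n) :
    (trStep tr a b).keys = nodesUpTo n.toNat ∧
    (∀ u : Int, ((trStep tr a b).getD u PySem.Dict.empty).keys = (adStep ad a b).getD u.toNat []) ∧
    (adStep ad a b).length = n.toNat + 1 ∧
    (∀ u v : Int, Entry (trStep tr a b) u v = 0) ∧
    (∀ u : Int, ∀ x ∈ (adStep ad a b).getD u.toNat [], 1 ≤ x ∧ x ≤ n) ∧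
    (∀ u : Int, ∀ x ∈ ad.getD u.toNat [], x ∈ (adStep ad a b).getD u.toNat []) ∧
    b ∈ (adStep ad a b).getD a.toNat [] ∧
    (∀ x : Int, x ∈ (adStep ad a b).getD (1 : Int).toNat [] →
        x ∈ ad.getD (1 : Int).toNat [] ∨ (a = 1 ∧ x = b)) := by
  have hanat : a.toNat < ad.length := by omega
  have hgetset : ∀ (u : Int), u.toNat = a.toNat →
      (ad.set a.toNat ((ad.getD a.toNat []) ++ [b])).getD u.toNat []
        = (ad.getD a.toNat []) ++ [b] := by
    intro u hu
    rw [hu]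
    exact getD_set_self _ _ hanat _ _
  have hgetne : ∀ (u : Int), u ≠ a →
      (ad.set a.toNat ((ad.getD a.toNat []) ++ [b])).getD u.toNat [] = ad.getD u.toNat [] := by
    intro u hu
    by_cases h : u.toNat = a.toNat
    · exact absurd (by omega : u = a) hu
    · rw [List.getD_eq_getElem?_getD, List.getElem?_set_ne (by omega),
        ← List.getD_eq_getElem?_getD]
  have hrowA : (trStep tr a b).getD a PySem.Dict.empty
      = (tr.getD a PySem.Dict.empty).insert b 0 := by
    unfold trStep; rw [PySem.Dict.getD_insert, if_pos rfl]
  have hrowNe : ∀ u : Int, u ≠ a →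
      (trStep tr a b).getD u PySem.Dict.empty = tr.getD u PySem.Dict.empty := by
    intro u hu; unfold trStep; rw [PySem.Dict.getD_insert, if_neg hu]
  have hcont : ((tr.getD a PySem.Dict.empty).contains b = true)
      ↔ ((ad.getD a.toNat []).contains b = true) := by
    rw [PySem.Dict.contains_iff_mem_keys, hK a, List.contains_iff_mem]
  refine ⟨?_, ?_, ?_, ?_, ?_, ?_, ?_, ?_⟩
  · unfold trStep
    rw [PySem.Dict.keys_insert_of_contains _ _
      ((PySem.Dict.contains_iff_mem_keys _ _).2
        (hkeys ▸ (mem_nodesUpTo _ _).2 ⟨ha1, by omega⟩))]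
    exact hkeys
  · intro u
    unfold adStep
    by_cases hu : u = a
    · subst hu
      rw [hrowA]
      by_cases hc : (ad.getD u.toNat []).contains b = true
      · rw [if_pos hc, PySem.Dict.keys_insert_of_contains _ _
          ((PySem.Dict.contains_iff_mem_keys _ _).2
            (by rw [hK u]; exact (List.contains_iff_mem).1 hc))]
        exact hK u
      · rw [if_neg hc, PySem.Dict.keys_insert_of_not_contains _ _
          (by rw [← Bool.not_eq_true, hcont]; exact hc), hK u, hgetset u rfl]
    · rw [hrowNe u hu]
      by_cases hc : (ad.getD a.toNat []).contains b = true
      · rw [if_pos hc]; exact hK u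
      · rw [if_neg hc, hgetne u hu]; exact hK u
  · unfold adStep
    split_ifs
    · exact hlen
    · rw [List.length_set]; exact hlen
  · intro u v
    unfold trStep
    rw [Entry_insert]
    split_ifs
    · rfl
    · exact hzero u v
  · intro u x hx
    unfold adStep at hx
    split_ifs at hx with hc
    · exact hbnd u x hx
    · by_cases h : u.toNat = a.toNat
      · rw [hgetset u h] at hx
        rcases List.mem_append.1 hx with h1 | h1
        · exact hbnd a x h1
        · rw [List.mem_singleton.1 h1]; exact ⟨hb1, hb2⟩
      · rw [hgetne u (fun he => h (by rw [he]))] at hx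
        exact hbnd u x hx
  · intro u x hx
    unfold adStep
    split_ifs with hc
    · exact hx
    · by_cases h : u.toNat = a.toNat
      · rw [hgetset u h]
        rw [show u.toNat = a.toNat from h] at hx
        exact List.mem_append_left _ hx
      · rw [hgetne u (fun he => h (by rw [he]))]
        exact hx
  · unfold adStep
    split_ifs with hc
    · exact (List.contains_iff_mem).1 hc
    · rw [hgetset a rfl]
      exact List.mem_append_right _ (by simp)
  · intro x hx
    unfold adStep at hx
    split_ifs at hx with hc
    · exact Or.inl hx
    · by_cases h : a = 1
      · subst h
        rw [hgetset 1 rfl] at hx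
        rcases List.mem_append.1 hx with h1 | h1
        · exact Or.inl h1
        · exact Or.inr ⟨rfl, List.mem_singleton.1 h1⟩
      · rw [List.getD_eq_getElem?_getD, List.getElem?_set_ne (by omega),
          ← List.getD_eq_getElem?_getD] at hx
        exact Or.inl hx

-- combined facts about the two edge structures after processing the wire list ws from base (tr, ad)
def BuildInv (n : Int) (ad0 : List (List Int)) (ws : List (List Int))
    (trF : PySem.Dict Int (PySem.Dict Int Int)) (adF : List (List Int)) : Prop :=
  trF.keys = nodesUpTo n.toNat ∧
  (∀ u : Int, (trF.getD u PySem.Dict.empty).keys = adF.getD u.toNat []) ∧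
  adF.length = n.toNat + 1 ∧
  (∀ u v : Int, Entry trF u v = 0) ∧
  (∀ u : Int, ∀ x ∈ adF.getD u.toNat [], 1 ≤ x ∧ x ≤ n) ∧
  (∀ u : Int, ∀ x ∈ ad0.getD u.toNat [], x ∈ adF.getD u.toNat []) ∧
  (∀ w ∈ ws, PySem.List.pyGetD w 1 0 ∈ adF.getD (PySem.List.pyGetD w 0 0).toNat [] ∧
      PySem.List.pyGetD w 0 0 ∈ adF.getD (PySem.List.pyGetD w 1 0).toNat []) ∧
  (∀ x : Int, x ∈ adF.getD (1 : Int).toNat [] → x ∈ ad0.getD (1 : Int).toNat [] ∨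
      ∃ w ∈ ws, (PySem.List.pyGetD w 0 0 = 1 ∧ x = PySem.List.pyGetD w 1 0) ∨
        (PySem.List.pyGetD w 1 0 = 1 ∧ x = PySem.List.pyGetD w 0 0))

theorem build_fold_inv (n : Int) :
    ∀ (ws : List (List Int)) (tr : PySem.Dict Int (PySem.Dict Int Int)) (ad : List (List Int)),
    (∀ w ∈ ws, (1 ≤ PySem.List.pyGetD w 0 0 ∧ PySem.List.pyGetD w 0 0 ≤ n) ∧
        (1 ≤ PySem.List.pyGetD w 1 0 ∧ PySem.List.pyGetD w 1 0 ≤ n)) →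
    tr.keys = nodesUpTo n.toNat →
    (∀ u : Int, (tr.getD u PySem.Dict.empty).keys = ad.getD u.toNat []) →
    ad.length = n.toNat + 1 →
    (∀ u v : Int, Entry tr u v = 0) →
    (∀ u : Int, ∀ x ∈ ad.getD u.toNat [], 1 ≤ x ∧ x ≤ n) →
    BuildInv n ad ws
      (ws.foldl (fun tr w => trStep (trStep tr (PySem.List.pyGetD w 0 0)
          (PySem.List.pyGetD w 1 0)) (PySem.List.pyGetD w 1 0) (PySem.List.pyGetD w 0 0)) tr)
      (ws.foldl (fun ad w => adStep (adStep ad (PySem.List.pyGetD w 0 0)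
          (PySem.List.pyGetD w 1 0)) (PySem.List.pyGetD w 1 0) (PySem.List.pyGetD w 0 0)) ad) := by
  intro ws
  induction ws with
  | nil =>
    intro tr ad _ h1 h2 h3 h4 h5
    exact ⟨h1, h2, h3, h4, h5, fun u x hx => hx, fun w hw => absurd hw (List.not_mem_nil),
      fun x hx => Or.inl hx⟩
  | cons w ws ih =>
    intro tr ad hb h1 h2 h3 h4 h5
    have hwb := hb w List.mem_cons_self
    obtain ⟨⟨ha1, ha2⟩, ⟨hb1, hb2⟩⟩ := hwb
    obtain ⟨s11, s12, s13, s14, s15, s16, s17, s18⟩ :=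
      half_step n tr ad (PySem.List.pyGetD w 0 0) (PySem.List.pyGetD w 1 0)
        ha1 ha2 hb1 hb2 h1 h2 h3 h4 h5
    obtain ⟨t11, t12, t13, t14, t15, t16, t17, t18⟩ :=
      half_step n _ _ (PySem.List.pyGetD w 1 0) (PySem.List.pyGetD w 0 0)
        hb1 hb2 ha1 ha2 s11 s12 s13 s14 s15
    rw [List.foldl_cons, List.foldl_cons]
    obtain ⟨c1, c2, c3, c4, c5, c6, c7, c8⟩ :=
      ih _ _ (fun w' hw' => hb w' (List.mem_cons_of_mem _ hw')) t11 t12 t13 t14 t15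
    refine ⟨c1, c2, c3, c4, c5, ?_, ?_, ?_⟩
    · exact fun u x hx => c6 u x (t16 u x (s16 u x hx))
    · intro w' hw'
      rcases List.mem_cons.mp hw' with rfl | hmem
      · exact ⟨c6 _ _ (t16 _ _ s17), c6 _ _ t17⟩
      · exact c7 w' hmem
    · intro x hx
      rcases c8 x hx with h | ⟨w', hw', hcase⟩
      · rcases t18 x h with h' | ⟨he, hx'⟩
        · rcases s18 x h' with h'' | ⟨he, hx'⟩
          · exact Or.inl h''
          · exact Or.inr ⟨w, List.mem_cons_self, Or.inl ⟨he, hx'⟩⟩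
        · exact Or.inr ⟨w, List.mem_cons_self, Or.inr ⟨he, hx'⟩⟩
      · exact Or.inr ⟨w', List.mem_cons_of_mem _ hw', hcase⟩

-- ---- min-fold shapes ----

theorem min_flip_foldl (f : Int → Int) : ∀ (l : List Int) (a : Int),
    l.foldl (fun ans x => min (f x) ans) a = (l.map f).foldl min a := by
  intro l
  induction l with
  | nil => intro a; rfl
  | cons x l ih =>
    intro a
    rw [List.foldl_cons, List.map_cons, List.foldl_cons, min_comm (f x) a]
    exact ih _

theorem nested_min_eq (keys : List Int) (inner : Int → List Int) (g : Int → Int → Int) :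
    ∀ a : Int,
    keys.foldl (fun ans node => (inner node).foldl (fun ans key => min (g node key) ans) ans) a
      = (keys.flatMap (fun node => (inner node).map (g node))).foldl min a := by
  induction keys with
  | nil => intro a; rfl
  | cons k ks ih =>
    intro a
    rw [List.foldl_cons, List.flatMap_cons, List.foldl_append, min_flip_foldl]
    exact ih _

theorem b_fold_eq (cond : Int → Bool) (f : Int → Int) (l : List Int) (a : Int) :
    l.foldl (fun ans v => if cond v then min ans (f v) else ans) a
      = ((l.filter cond).map f).foldl min a := by
  rw [PySem.List.foldl_if_eq_foldl_filter cond (fun ans v => min ans (f v)) l a,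
    List.foldl_map]

-- the closing argument: with the dfs facts in hand, A's double loop over stored edge values
-- and B's single loop over visited nodes compute the same minimum
theorem final_agg (n : Int) (hn : 1 ≤ n) (adj : List (List Int))
    (tree2 : PySem.Dict Int (PySem.Dict Int Int)) (tF : PySem.Dict Int Bool)
    (visF : List Bool) (sizeF : List Int)
    (hK : ∀ u : Int, (tree2.getD u PySem.Dict.empty).keys = adj.getD u.toNat [])
    (hbnd : ∀ u : Int, ∀ x ∈ adj.getD u.toNat [], 1 ≤ x ∧ x ≤ n)
    (hV : ∀ u : Int, tF.getD u false = visF.getD u.toNat false)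
    (hE : ∀ u v : Int, Entry tree2 u v ≠ 0 →
        tF.getD v false = true ∧ Entry tree2 u v = sizeF.getD v.toNat 0)
    (hN : ∀ u v : Int, Entry tree2 u v ≠ 0 → v ≠ 1)
    (hC : ∀ v : Int, tF.getD v false = true → v = 1 ∨ ∃ u, Entry tree2 u v ≠ 0)
    (hS : ∀ v : Int, tF.getD v false = true → v ≠ 1 →
        1 ≤ sizeF.getD v.toNat 0 ∧ sizeF.getD v.toNat 0 ≤ n)
    (hD : (∀ u : Int, adj.getD u.toNat [] = []) ∨ 101 ≤ n ∨
        (∃ y : Int, y ∈ adj.getD (1 : Int).toNat [] ∧ 2 ≤ y ∧ y ≤ n ∧ tF.getD y false = true)) :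
    tree2.keys.foldl (fun ans node =>
      ((tree2.getD node PySem.Dict.empty).keys).foldl (fun ans key =>
        min |n - Entry tree2 node key - Entry tree2 node key| ans) ans) 101
    = (PySem.List.pyRange 2 (n + 1) 1).foldl (fun ans v =>
        if visF.getD v.toNat false then min ans |n - 2 * sizeF.getD v.toNat 0| else ans) 101 := by
  rw [nested_min_eq, b_fold_eq]
  set TA := tree2.keys.flatMap (fun node => ((tree2.getD node PySem.Dict.empty).keys).map
    (fun key => |n - Entry tree2 node key - Entry tree2 node key|)) with hTA
  set TB := (((PySem.List.pyRange 2 (n + 1) 1).filter (fun v => visF.getD v.toNat false)).map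
    (fun v => |n - 2 * sizeF.getD v.toNat 0|)) with hTB
  apply le_antisymm
  · -- every B term has a matching A term
    rcases PySem.List.foldl_min_mem TB 101 with hB | hB
    · rw [hB]; exact (PySem.List.foldl_min_le TA 101).1
    · obtain ⟨v, hvf, hveq⟩ := List.mem_map.1 hB
      obtain ⟨hvr, hvc⟩ := List.mem_filter.1 hvf
      have hv2 := PySem.List.mem_pyRange_one.1 hvr
      have htFv : tF.getD v false = true := by rw [hV v]; exact hvc
      rcases hC v htFv with h1 | h1
      · exact absurd h1 (by omega)
      · obtain ⟨u, hu1⟩ := h1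
        have hF := hE u v hu1
        have huk : u ∈ tree2.keys := by
          by_contra hc
          have hcc : tree2.contains u = false := by
            rw [PySem.Dict.contains_eq_decide_mem_keys]; simp [hc]
          have hz : Entry tree2 u v = 0 := by
            unfold Entry
            rw [PySem.Dict.getD_of_not_contains _ _ hcc]
            exact PySem.Dict.getD_empty _ _
          exact hu1 hz
        have hvk : v ∈ (tree2.getD u PySem.Dict.empty).keys := by
          by_contra hc
          have hcc : (tree2.getD u PySem.Dict.empty).contains v = false := by
            rw [PySem.Dict.contains_eq_decide_mem_keys]; simp [hc]
          exact hu1 (PySem.Dict.getD_of_not_contains _ _ hcc)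
        have hmemA : |n - Entry tree2 u v - Entry tree2 u v| ∈ TA :=
          List.mem_flatMap.2 ⟨u, huk, List.mem_map.2 ⟨v, hvk, rfl⟩⟩
        calc TA.foldl min 101 ≤ _ := (PySem.List.foldl_min_le TA 101).2 _ hmemA
        _ = TB.foldl min 101 := by rw [← hveq, hF.2]; congr 1; ring
  · -- every A term is matched or dominated
    rcases PySem.List.foldl_min_mem TA 101 with hA | hA
    · rw [hA]; exact (PySem.List.foldl_min_le TB 101).1
    · obtain ⟨u, hu, hx⟩ := List.mem_flatMap.1 hA
      obtain ⟨v, hv, hveq⟩ := List.mem_map.1 hx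
      by_cases he : Entry tree2 u v = 0
      · -- a 0-initialized direction: A's term is |n|; B's minimum is below it
        have hTAval : TA.foldl min 101 = |n| := by
          rw [← hveq, he]; congr 1; ring
        rw [hTAval]
        have habs : |n| = n := abs_of_nonneg (by omega)
        rcases hD with hD | hD | hD
        · rw [hK u, hD u] at hv
          exact absurd hv (List.not_mem_nil)
        · calc TB.foldl min 101 ≤ 101 := (PySem.List.foldl_min_le TB 101).1
          _ ≤ |n| := by omega
        · obtain ⟨y, hy1, hy2, hy3, hy4⟩ := hD
          have hyS := hS y hy4 (by omega)
          have hymem : |n - 2 * sizeF.getD y.toNat 0| ∈ TB :=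
            List.mem_map.2 ⟨y, List.mem_filter.2 ⟨PySem.List.mem_pyRange_one.2 ⟨hy2, by omega⟩,
              by show visF.getD y.toNat false = true; rw [← hV y]; exact hy4⟩, rfl⟩
          calc TB.foldl min 101 ≤ _ := (PySem.List.foldl_min_le TB 101).2 _ hymem
          _ ≤ |n| := by rw [habs]; exact abs_le.2 ⟨by omega, by omega⟩
      · -- a real tree edge: match B's term for the child v
        have hF := hE u v he
        have hne1 : v ≠ 1 := hN u v he
        have hbv : 1 ≤ v ∧ v ≤ n := hbnd u v (by rw [← hK u]; exact hv)
        have hmemB : |n - 2 * sizeF.getD v.toNat 0| ∈ TB :=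
          List.mem_map.2 ⟨v, List.mem_filter.2 ⟨PySem.List.mem_pyRange_one.2 ⟨by omega, by omega⟩,
            by show visF.getD v.toNat false = true; rw [← hV v]; exact hF.1⟩, rfl⟩
        calc TB.foldl min 101 ≤ _ := (PySem.List.foldl_min_le TB 101).2 _ hmemB
        _ = TA.foldl min 101 := by rw [← hveq, hF.2]; congr 1; ring

-- when every neighbour is already visited, both loops do nothing
theorem skipA (rec : Int → PySem.Dict Int (PySem.Dict Int Int) → PySem.Dict Int Bool →
      Int × PySem.Dict Int (PySem.Dict Int Int) × PySem.Dict Int Bool) (start : Int) :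
    ∀ (L : List Int) (k : Int) (tree : PySem.Dict Int (PySem.Dict Int Int))
      (t : PySem.Dict Int Bool), (∀ x ∈ L, t.getD x false = true) →
    L.foldl (stepA rec start) (k, tree, t) = (k, tree, t) := by
  intro L
  induction L with
  | nil => intro k tree t _; rfl
  | cons x L ih =>
    intro k tree t h
    rw [List.foldl_cons]
    have hx : t.getD x false = true := h x List.mem_cons_self
    have hstep : stepA rec start (k, tree, t) x = (k, tree, t) := by
      unfold stepA
      rw [if_neg (by simp [hx])]
    rw [hstep]
    exact ih k tree t (fun y hy => h y (List.mem_cons_of_mem _ hy))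

theorem skipB (rec : Int → List Bool → List Int → Int × List Bool × List Int) :
    ∀ (L : List Int) (k : Int) (visited : List Bool) (size : List Int),
      (∀ x ∈ L, visited.getD x.toNat false = true) →
    L.foldl (stepB rec) (k, visited, size) = (k, visited, size) := by
  intro L
  induction L with
  | nil => intro k visited size _; rfl
  | cons x L ih =>
    intro k visited size h
    rw [List.foldl_cons]
    have hx : visited.getD x.toNat false = true := h x List.mem_cons_self
    have hstep : stepB rec (k, visited, size) x = (k, visited, size) := by
      unfold stepB
      rw [if_neg (by rw [hx]; simp)]
    rw [hstep]
    exact ih k visited size (fun y hy => h y (List.mem_cons_of_mem _ hy))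

-- ---- the stack machine runStack computes the recursive reference dfsB ----

theorem getD_set_true (l : List Bool) (k j : Nat) (h : l.getD j false = true) :
    (l.set k true).getD j false = true := by
  rw [List.getD_eq_getElem?_getD] at h ⊢
  by_cases hk : k = j
  · subst hk
    have hlt : k < l.length := by
      by_contra hge
      rw [List.getElem?_eq_none (by omega)] at h
      simp at h
    rw [List.getElem?_set_self hlt]
    rfl
  · rw [List.getElem?_set_ne hk]
    exact h

-- list-index versions of the unvisited count and the step potential
def UCl (n : Int) (vis : List Bool) : Nat :=
  (nodesUpTo n.toNat).countP (fun x => !(vis.getD x.toNat false))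

def PsiN (n : Int) (adj : List (List Int)) (vis : List Bool) : Nat :=
  psi adj vis (nodesUpTo n.toNat)

theorem UCl_pos (n : Int) (vis : List Bool) (u : Int) (h1 : 1 ≤ u) (h2 : u ≤ n)
    (hu : vis.getD u.toNat false = false) : 0 < UCl n vis := by
  unfold UCl
  rw [List.countP_pos_iff]
  exact ⟨u, (mem_nodesUpTo _ _).2 ⟨h1, by omega⟩, by rw [hu]; rfl⟩

theorem UCl_mark (n : Int) (vis : List Bool) (u : Int) (h1 : 1 ≤ u) (h2 : u ≤ n)
    (hu : vis.getD u.toNat false = false) (hr : u.toNat < vis.length) :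
    UCl n (vis.set u.toNat true) + 1 ≤ UCl n vis := by
  unfold UCl
  refine countP_succ_le _ _ _ ?_ u ((mem_nodesUpTo _ _).2 ⟨h1, by omega⟩)
      (by rw [hu]; rfl) ?_
  · intro v _ hv
    cases h' : vis.getD v.toNat false
    · rfl
    · rw [getD_set_true vis u.toNat v.toNat h'] at hv
      exact absurd hv (by decide)
  · rw [getD_set_self vis u.toNat hr true false]
    rfl

theorem UCl_mono (n : Int) (vis vis' : List Bool)
    (h : ∀ j : Nat, vis.getD j false = true → vis'.getD j false = true) :
    UCl n vis' ≤ UCl n vis := by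
  unfold UCl
  refine List.countP_mono_left ?_
  intro v _ hv
  cases h' : vis.getD v.toNat false
  · rfl
  · rw [h v.toNat h'] at hv
    exact absurd hv (by decide)

theorem UCl_le (n : Int) (vis : List Bool) : UCl n vis ≤ n.toNat := by
  unfold UCl
  calc (nodesUpTo n.toNat).countP _ ≤ (nodesUpTo n.toNat).length := List.countP_le_length
  _ = n.toNat := by simp [nodesUpTo]

theorem psi_eq_sum (adj : List (List Int)) (vis : List Bool) :
    ∀ (l : List Int) (a : Nat),
    l.foldl (fun s x => if vis.getD x.toNat false then s
        else s + (adj.getD x.toNat []).length + 1) a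
      = a + (l.map (fun x => if vis.getD x.toNat false then 0
          else (adj.getD x.toNat []).length + 1)).sum := by
  intro l
  induction l with
  | nil => intro a; simp
  | cons x l ih =>
    intro a
    rw [List.foldl_cons, List.map_cons, List.sum_cons, ih]
    by_cases h : vis.getD x.toNat false = true
    · rw [if_pos h, if_pos h]
      omega
    · rw [if_neg h, if_neg h]
      omega

theorem psi_mark (n : Int) (adj : List (List Int)) (vis : List Bool) (u : Int)
    (h1 : 1 ≤ u) (h2 : u ≤ n) (hu : vis.getD u.toNat false = false)
    (hr : u.toNat < vis.length) :
    PsiN n adj (vis.set u.toNat true) + ((adj.getD u.toNat []).length + 1) = PsiN n adj vis := by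
  have hgen : ∀ l : List Int, l.Nodup → (∀ x ∈ l, 1 ≤ x) → u ∈ l →
      (l.map (fun x => if (vis.set u.toNat true).getD x.toNat false then 0
          else (adj.getD x.toNat []).length + 1)).sum + ((adj.getD u.toNat []).length + 1)
        = (l.map (fun x => if vis.getD x.toNat false then 0
            else (adj.getD x.toNat []).length + 1)).sum := by
    intro l
    induction l with
    | nil => intro _ _ hmem; cases hmem
    | cons a l ih =>
      intro hnd hpos hmem
      rw [List.nodup_cons] at hnd
      have hother : ∀ x : Int, x ∈ l ∨ x ∈ a :: l → x ≠ u →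
          (vis.set u.toNat true).getD x.toNat false = vis.getD x.toNat false := by
        intro x hx hxu
        have hxpos : 1 ≤ x := by
          rcases hx with hx | hx
          · exact hpos x (List.mem_cons_of_mem _ hx)
          · exact hpos x hx
        have : u.toNat ≠ x.toNat := by omega
        rw [List.getD_eq_getElem?_getD, List.getElem?_set_ne this, ← List.getD_eq_getElem?_getD]
      rcases List.mem_cons.mp hmem with rfl | hmem'
      · -- head is u
        rw [List.map_cons, List.map_cons, List.sum_cons, List.sum_cons]
        have hset : (vis.set u.toNat true).getD u.toNat false = true := by
          rw [getD_set_self vis u.toNat hr true false]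
        rw [hset, hu]
        have htail : (l.map (fun x => if (vis.set u.toNat true).getD x.toNat false then 0
            else (adj.getD x.toNat []).length + 1))
          = (l.map (fun x => if vis.getD x.toNat false then 0
              else (adj.getD x.toNat []).length + 1)) := by
          refine List.map_congr_left ?_
          intro x hx
          rw [hother x (Or.inl hx) (fun he => hnd.1 (he ▸ hx))]
        rw [htail]
        simp
        omega
      · -- head is not u
        have hau : a ≠ u := fun he => hnd.1 (he ▸ hmem')
        rw [List.map_cons, List.map_cons, List.sum_cons, List.sum_cons,
          hother a (Or.inr List.mem_cons_self) hau,
          ← ih hnd.2 (fun x hx => hpos x (List.mem_cons_of_mem _ hx)) hmem']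
        omega
  unfold PsiN psi
  rw [psi_eq_sum, psi_eq_sum, Nat.zero_add, Nat.zero_add]
  exact hgen (nodesUpTo n.toNat) (nodesUpTo_nodup _)
    (fun x hx => ((mem_nodesUpTo _ _).1 hx).1) ((mem_nodesUpTo _ _).2 ⟨h1, by omega⟩)

theorem dfsB_len (adj : List (List Int)) : ∀ (fuel : Nat) (v : Int) (vis : List Bool)
    (size : List Int),
    (dfsB adj fuel v vis size).2.1.length = vis.length ∧
    (dfsB adj fuel v vis size).2.2.length = size.length := by
  intro fuel
  induction fuel with
  | zero => intro v vis size; exact ⟨rfl, rfl⟩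
  | succ f ih =>
    intro v vis size
    have hloop : ∀ (L : List Int) (acc : Int × List Bool × List Int),
        (L.foldl (stepB (dfsB adj f)) acc).2.1.length = acc.2.1.length ∧
        (L.foldl (stepB (dfsB adj f)) acc).2.2.length = acc.2.2.length := by
      intro L
      induction L with
      | nil => intro acc; exact ⟨rfl, rfl⟩
      | cons x L ihL =>
        intro acc
        rw [List.foldl_cons]
        have hst : (stepB (dfsB adj f) acc x).2.1.length = acc.2.1.length ∧
            (stepB (dfsB adj f) acc x).2.2.length = acc.2.2.length := by
          unfold stepB
          split_ifs with h
          · exact ⟨(ih x acc.2.1 acc.2.2).1, (ih x acc.2.1 acc.2.2).2⟩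
          · exact ⟨rfl, rfl⟩
        rcases ihL (stepB (dfsB adj f) acc x) with ⟨h1, h2⟩
        rw [h1, h2]
        exact hst
    simp only [dfsB]
    rcases hloop (adj.getD v.toNat []) (1, vis.set v.toNat true, size) with ⟨h1, h2⟩
    refine ⟨?_, ?_⟩
    · rw [h1]; simp
    · rw [List.length_set, h2]

theorem loopB_mono (adj : List (List Int)) (fuel : Nat)
    (H : ∀ (v : Int) (vis : List Bool) (size : List Int) (j : Nat),
      vis.getD j false = true → (dfsB adj fuel v vis size).2.1.getD j false = true) :
    ∀ (L : List Int) (acc : Int × List Bool × List Int) (j : Nat),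
      acc.2.1.getD j false = true →
      ((L.foldl (stepB (dfsB adj fuel)) acc).2.1).getD j false = true := by
  intro L
  induction L with
  | nil => intro acc j h; exact h
  | cons x L ih =>
    intro acc j h
    rw [List.foldl_cons]
    refine ih _ j ?_
    unfold stepB
    split_ifs with hx
    · exact H x acc.2.1 acc.2.2 j h
    · exact h

theorem dfsB_mono (adj : List (List Int)) : ∀ (fuel : Nat) (v : Int) (vis : List Bool)
    (size : List Int) (j : Nat),
    vis.getD j false = true → (dfsB adj fuel v vis size).2.1.getD j false = true := by
  intro fuel
  induction fuel with
  | zero => intro v vis size j h; exact h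
  | succ f ih =>
    intro v vis size j h
    simp only [dfsB]
    exact loopB_mono adj f ih (adj.getD v.toNat []) (1, vis.set v.toNat true, size) j
      (getD_set_true vis v.toNat j h)

-- the continuation after finishing one stack frame: either the loop ends or the child's
-- size is added onto the parent's accumulator
def contStack (adj : List (List Int)) (f : Nat) (rest : List (Int × Nat × Int)) (out : Int)
    (vis : List Bool) (size : List Int) : List Bool × List Int :=
  match rest with
  | [] => (vis, size)
  | (p, j, t) :: rest' => runStack adj f ((p, j, t + out) :: rest') vis size

-- one whole frame: pushing an unvisited node u and running it to its pop computes exactly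
-- dfsB's value, in some definite number k of steps bounded by the potential PsiN
def FrameSim (n : Int) (adj : List (List Int)) (fuelR : Nat) : Prop :=
  ∀ (u : Int) (vis : List Bool) (size : List Int) (rest : List (Int × Nat × Int)),
    vis.length = n.toNat + 1 → 1 ≤ u → u ≤ n → vis.getD u.toNat false = false →
    UCl n vis ≤ fuelR →
    ∃ k : Nat,
      k + PsiN n adj (dfsB adj fuelR u vis size).2.1 ≤ PsiN n adj vis ∧
      ∀ f : Nat, runStack adj (k + f) ((u, 0, 1) :: rest) (vis.set u.toNat true) size =
        contStack adj f rest (dfsB adj fuelR u vis size).1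
          (dfsB adj fuelR u vis size).2.1 (dfsB adj fuelR u vis size).2.2

theorem inner_sim (n : Int) (adj : List (List Int)) (hadm : Adm n adj) (fuelR : Nat)
    (HC : FrameSim n adj fuelR) :
    ∀ (m i : Nat) (v s : Int) (rest : List (Int × Nat × Int)) (vis : List Bool)
      (size : List Int),
    vis.length = n.toNat + 1 → 1 ≤ v → v ≤ n →
    (adj.getD v.toNat []).length = i + m →
    UCl n vis ≤ fuelR →
    ∃ k : Nat,
      k + PsiN n adj (((adj.getD v.toNat []).drop i).foldl (stepB (dfsB adj fuelR))
            (s, vis, size)).2.1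
        ≤ (m + 1) + PsiN n adj vis ∧
      ∀ f : Nat,
        runStack adj (k + f) ((v, i, s) :: rest) vis size =
          contStack adj f rest
            (((adj.getD v.toNat []).drop i).foldl (stepB (dfsB adj fuelR)) (s, vis, size)).1
            (((adj.getD v.toNat []).drop i).foldl (stepB (dfsB adj fuelR)) (s, vis, size)).2.1
            ((((adj.getD v.toNat []).drop i).foldl (stepB (dfsB adj fuelR))
                (s, vis, size)).2.2.set v.toNat
              (((adj.getD v.toNat []).drop i).foldl (stepB (dfsB adj fuelR)) (s, vis, size)).1) := by
  intro m
  induction m with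
  | zero =>
    intro i v s rest vis size hlen hv1 hv2 hiA hUC
    have hdrop : (adj.getD v.toNat []).drop i = [] := List.drop_eq_nil_of_le (by omega)
    rw [hdrop]
    simp only [List.foldl_nil]
    refine ⟨1, by omega, ?_⟩
    intro f
    rw [Nat.add_comm 1 f]
    cases rest with
    | nil =>
      simp only [runStack, contStack]
      rw [if_neg (by omega)]
    | cons pr rest' =>
      obtain ⟨p, j, t⟩ := pr
      simp only [runStack, contStack]
      rw [if_neg (by omega)]
  | succ m ihm =>
    intro i v s rest vis size hlen hv1 hv2 hiA hUC
    have hilt : i < (adj.getD v.toNat []).length := by omega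
    have hdrop : (adj.getD v.toNat []).drop i
        = (adj.getD v.toNat [])[i] :: (adj.getD v.toNat []).drop (i + 1) :=
      List.drop_eq_getElem_cons hilt
    have hugetD : (adj.getD v.toNat []).getD i 0 = (adj.getD v.toNat [])[i] := by
      rw [List.getD_eq_getElem?_getD, List.getElem?_eq_getElem hilt]
      rfl
    have humem : (adj.getD v.toNat [])[i] ∈ adj.getD v.toNat [] := List.getElem_mem hilt
    have hub := hadm.2 v _ humem
    rw [hdrop, List.foldl_cons]
    by_cases hvu : vis.getD ((adj.getD v.toNat [])[i]).toNat false = true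
    · -- already visited: skip
      have hstep : stepB (dfsB adj fuelR) (s, vis, size) ((adj.getD v.toNat [])[i])
          = (s, vis, size) := by
        unfold stepB
        rw [if_neg (by rw [hvu]; simp)]
      rw [hstep]
      obtain ⟨k, hk, hrun⟩ := ihm (i + 1) v s rest vis size hlen hv1 hv2 (by omega) hUC
      refine ⟨k + 1, by omega, ?_⟩
      intro f
      have : k + 1 + f = (k + f) + 1 := by omega
      rw [this]
      simp only [runStack]
      rw [if_pos hilt, hugetD, if_pos hvu]
      exact hrun f
    · -- unvisited: push, run the child frame (HC), then continue the loop (ihm)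
      simp only [Bool.not_eq_true] at hvu
      have hstep : stepB (dfsB adj fuelR) (s, vis, size) ((adj.getD v.toNat [])[i])
          = (s + (dfsB adj fuelR ((adj.getD v.toNat [])[i]) vis size).1,
             (dfsB adj fuelR ((adj.getD v.toNat [])[i]) vis size).2.1,
             (dfsB adj fuelR ((adj.getD v.toNat [])[i]) vis size).2.2) := by
        unfold stepB
        rw [if_pos hvu]
      rw [hstep]
      obtain ⟨kc, hkc, hrunc⟩ := HC ((adj.getD v.toNat [])[i]) vis size
        ((v, i + 1, s) :: rest) hlen hub.1 hub.2 hvu hUC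
      have hlen' : (dfsB adj fuelR ((adj.getD v.toNat [])[i]) vis size).2.1.length
          = n.toNat + 1 := by
        rw [(dfsB_len adj fuelR _ vis size).1]; exact hlen
      have hUC' : UCl n (dfsB adj fuelR ((adj.getD v.toNat [])[i]) vis size).2.1 ≤ fuelR := by
        calc UCl n (dfsB adj fuelR ((adj.getD v.toNat [])[i]) vis size).2.1
            ≤ UCl n vis := UCl_mono n vis _ (fun j hj => dfsB_mono adj fuelR _ vis size j hj)
        _ ≤ fuelR := hUC
      obtain ⟨kr, hkr, hrunr⟩ := ihm (i + 1) v
        (s + (dfsB adj fuelR ((adj.getD v.toNat [])[i]) vis size).1) rest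
        (dfsB adj fuelR ((adj.getD v.toNat [])[i]) vis size).2.1
        (dfsB adj fuelR ((adj.getD v.toNat [])[i]) vis size).2.2
        hlen' hv1 hv2 (by omega) hUC'
      refine ⟨1 + kc + kr, by omega, ?_⟩
      intro f
      have harr : 1 + kc + kr + f = (kc + (kr + f)) + 1 := by omega
      rw [harr]
      simp only [runStack]
      have hcond : ¬ ((vis.getD ((adj.getD v.toNat [])[i]).toNat false) = true) := by
        rw [hvu]; decide
      rw [if_pos hilt, hugetD, if_neg hcond]
      rw [hrunc (kr + f)]
      simp only [contStack]
      exact hrunr f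

theorem frame_sim (n : Int) (adj : List (List Int)) (hadm : Adm n adj) :
    ∀ fuelR : Nat, FrameSim n adj fuelR := by
  intro fuelR
  induction fuelR with
  | zero =>
    intro u vis size rest hlen hu1 hu2 hunm hUC
    have := UCl_pos n vis u hu1 hu2 hunm
    omega
  | succ g ih =>
    intro u vis size rest hlen hu1 hu2 hunm hUC
    have hr : u.toNat < vis.length := by rw [hlen]; omega
    have hUCm : UCl n (vis.set u.toNat true) ≤ g := by
      have := UCl_mark n vis u hu1 hu2 hunm hr
      omega
    obtain ⟨k, hk, hrun⟩ := inner_sim n adj hadm g ih ((adj.getD u.toNat []).length) 0 u 1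
      rest ((vis.set u.toNat true)) size
      (by rw [List.length_set]; exact hlen) hu1 hu2 (by omega) hUCm
    refine ⟨k, ?_, ?_⟩
    · have hmark := psi_mark n adj vis u hu1 hu2 hunm hr
      have hB : (dfsB adj (g + 1) u vis size).2.1
          = (((adj.getD u.toNat []).drop 0).foldl (stepB (dfsB adj g))
              (1, vis.set u.toNat true, size)).2.1 := by
        simp only [dfsB, List.drop_zero]
      rw [hB]
      omega
    · intro f
      have hB1 : (dfsB adj (g + 1) u vis size).1
          = (((adj.getD u.toNat []).drop 0).foldl (stepB (dfsB adj g))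
              (1, vis.set u.toNat true, size)).1 := by
        simp only [dfsB, List.drop_zero]
      have hB2 : (dfsB adj (g + 1) u vis size).2.1
          = (((adj.getD u.toNat []).drop 0).foldl (stepB (dfsB adj g))
              (1, vis.set u.toNat true, size)).2.1 := by
        simp only [dfsB, List.drop_zero]
      have hB3 : (dfsB adj (g + 1) u vis size).2.2
          = (((adj.getD u.toNat []).drop 0).foldl (stepB (dfsB adj g))
              (1, vis.set u.toNat true, size)).2.2.set u.toNat
            (((adj.getD u.toNat []).drop 0).foldl (stepB (dfsB adj g))
              (1, vis.set u.toNat true, size)).1 := by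
        simp only [dfsB, List.drop_zero]
      rw [hB1, hB2, hB3]
      exact hrun f

-- the bridge: with full fuel, B's stack machine produces exactly the recursive DFS's
-- visited list and size array
theorem run_eq_dfsB (n : Int) (adj : List (List Int)) (hadm : Adm n adj) :
    runStack adj (psi adj (List.replicate (n + 1).toNat false) (nodesUpTo n.toNat)) [(1, 0, 1)]
      ((List.replicate (n + 1).toNat false).set (1 : Int).toNat true)
      (List.replicate (n + 1).toNat 0)
    = ((dfsB adj n.toNat 1 (List.replicate (n + 1).toNat false)
          (List.replicate (n + 1).toNat 0)).2.1,
       (dfsB adj n.toNat 1 (List.replicate (n + 1).toNat false)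
          (List.replicate (n + 1).toNat 0)).2.2) := by
  have hn := hadm.1
  obtain ⟨g, hg⟩ : ∃ g, n.toNat = g + 1 := ⟨n.toNat - 1, by omega⟩
  have hlen : (List.replicate (n + 1).toNat (false : Bool)).length = n.toNat + 1 := by
    rw [List.length_replicate]; omega
  have hunm : (List.replicate (n + 1).toNat (false : Bool)).getD (1 : Int).toNat false
      = false := getD_replicate_same _ _ _
  have hUC : UCl n (List.replicate (n + 1).toNat false) ≤ g + 1 := by
    have := UCl_le n (List.replicate (n + 1).toNat false)
    omega
  obtain ⟨k, hk, hrun⟩ := frame_sim n adj hadm (g + 1) 1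
    (List.replicate (n + 1).toNat false) (List.replicate (n + 1).toNat 0) []
    hlen (by omega) hn hunm hUC
  have hkF : k ≤ PsiN n adj (List.replicate (n + 1).toNat false) := by omega
  have := hrun (PsiN n adj (List.replicate (n + 1).toNat false) - k)
  rw [show k + (PsiN n adj (List.replicate (n + 1).toNat false) - k)
      = PsiN n adj (List.replicate (n + 1).toNat false) from by omega] at this
  unfold contStack at this
  rw [← hg] at this
  exact this

-- ===== VERDICT (by name: the statement is the Claim_ definition above) =====
theorem solution_spec : Claim_unchanged_solution := by
  intro n wires _ hpre hnd
  obtain ⟨hn, hw⟩ := hpre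
  have hkeys0 : ((PySem.List.pyRange 0 n 1).foldl
      (fun d i => d.insert (i + 1) PySem.Dict.empty)
      (PySem.Dict.empty : PySem.Dict Int (PySem.Dict Int Int))).keys = nodesUpTo n.toNat := by
    rw [keys_fold_insert_empty _ _ (fun i _ => PySem.Dict.contains_empty _)
      (by rw [pyRange_map_succ n (by omega)]; exact nodesUpTo_nodup _)]
    rw [PySem.Dict.keys_empty, List.nil_append, pyRange_map_succ n (by omega)]
  have hgetD0 : ∀ u : Int, ((PySem.List.pyRange 0 n 1).foldl
      (fun d i => d.insert (i + 1) PySem.Dict.empty)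
      (PySem.Dict.empty : PySem.Dict Int (PySem.Dict Int Int))).getD u PySem.Dict.empty
        = PySem.Dict.empty :=
    tree0_getD _ _ (fun u => PySem.Dict.getD_empty _ _)
  have hbuild : BuildInv n (List.replicate (n + 1).toNat []) wires
      (buildTreeA n wires) (buildAdj n wires) :=
    build_fold_inv n wires _ _
      (fun w hw' => ⟨(hw w hw').2.1, (hw w hw').2.2⟩)
      hkeys0
      (fun u => by rw [hgetD0 u, getD_replicate_same, PySem.Dict.keys_empty])
      (by rw [List.length_replicate]; omega)
      (fun u v => by unfold Entry; rw [hgetD0 u]; exact PySem.Dict.getD_empty _ _)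
      (fun u x hx => absurd (by rwa [getD_replicate_same] at hx) (List.not_mem_nil))
  obtain ⟨hBk, hBK, hBlen, hBzero, hBbnd, _hBpers, hBwmem, _hBorig⟩ := hbuild
  have hadm : Adm n (buildAdj n wires) := ⟨hn, hBbnd⟩
  have hgett0 : ∀ u : Int, ((PySem.List.pyRange 0 n 1).foldl (fun d i => d.insert (i + 1) false)
      (PySem.Dict.empty : PySem.Dict Int Bool)).getD u false = false :=
    t0_getD _ _ (fun u => PySem.Dict.getD_empty _ _)
  have hrel0 : SRel n (buildAdj n wires) (buildTreeA n wires)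
      ((PySem.List.pyRange 0 n 1).foldl (fun d i => d.insert (i + 1) false) PySem.Dict.empty)
      (List.replicate (n + 1).toNat false) (List.replicate (n + 1).toNat 0) := by
    refine ⟨hBk, hBK, ?_, by rw [List.length_replicate]; omega,
      by rw [List.length_replicate]; omega, ?_⟩
    · intro u; rw [hgett0 u, getD_replicate_same]
    · intro u v h; exact absurd (hBzero u v) h
  have hUC0 : UC n.toNat ((PySem.List.pyRange 0 n 1).foldl (fun d i => d.insert (i + 1) false)
      PySem.Dict.empty) ≤ n.toNat := by
    unfold UC
    calc (nodesUpTo n.toNat).countP _ ≤ (nodesUpTo n.toNat).length := List.countP_le_length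
    _ = n.toNat := by simp [nodesUpTo]
  obtain ⟨RelF, PostF, NBF⟩ := dfs_sim n (buildAdj n wires) hadm n.toNat 1 (buildTreeA n wires)
    _ _ _ hrel0 (by omega) hn (hgett0 1) hUC0
  obtain ⟨RK1, RK2, RV, RL1, RL2, RE⟩ := RelF
  obtain ⟨_, _, _, _, Pnew, _, Pcomp, Psc, _, _, _⟩ := PostF
  set tree2 := (dfsA n.toNat 1 (buildTreeA n wires) ((PySem.List.pyRange 0 n 1).foldl
    (fun d i => d.insert (i + 1) false) PySem.Dict.empty)).2.1 with htree2
  set tF := (dfsA n.toNat 1 (buildTreeA n wires) ((PySem.List.pyRange 0 n 1).foldl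
    (fun d i => d.insert (i + 1) false) PySem.Dict.empty)).2.2 with htF
  set visF := (dfsB (buildAdj n wires) n.toNat 1 (List.replicate (n + 1).toNat false)
    (List.replicate (n + 1).toNat 0)).2.1 with hvisF
  set sizeF := (dfsB (buildAdj n wires) n.toNat 1 (List.replicate (n + 1).toNat false)
    (List.replicate (n + 1).toNat 0)).2.2 with hsizeF
  have hN' : ∀ u v : Int, Entry tree2 u v ≠ 0 → v ≠ 1 := by
    intro u v h
    rcases Pnew u v h with h1 | h1
    · exact absurd (hBzero u v) h1
    · exact h1.2
  have hC' : ∀ v : Int, tF.getD v false = true → v = 1 ∨ ∃ u, Entry tree2 u v ≠ 0 := by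
    intro v h
    rcases Pcomp v h with h1 | h1 | h1
    · rw [hgett0 v] at h1; exact absurd h1 (by simp)
    · exact Or.inl h1
    · obtain ⟨u, h2, _⟩ := h1; exact Or.inr ⟨u, h2⟩
  have hS' : ∀ v : Int, tF.getD v false = true → v ≠ 1 →
      1 ≤ sizeF.getD v.toNat 0 ∧ sizeF.getD v.toNat 0 ≤ n := by
    intro v h _
    rcases Psc v h with h1 | h1
    · rw [hgett0 v] at h1; exact absurd h1 (by simp)
    · exact h1
  have hDcases : (∀ u : Int, (buildAdj n wires).getD u.toNat [] = []) ∨ 101 ≤ n ∨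
      (∃ y : Int, y ∈ (buildAdj n wires).getD (1 : Int).toNat [] ∧ 2 ≤ y ∧ y ≤ n ∧
        tF.getD y false = true) := by
    by_cases hwe : wires = []
    · left
      intro u
      subst hwe
      exact getD_replicate_same _ _ _
    · by_cases h100 : n ≤ 100
      · right; right
        have hex : ∃ w ∈ wires,
            ¬((PySem.List.pyGetD w 0 0 = 1) ↔ (PySem.List.pyGetD w 1 0 = 1)) := by
          by_contra hall
          push_neg at hall
          exact hnd ⟨hwe, h100, hall⟩
        obtain ⟨w, hwmem', hwiff⟩ := hex
        by_cases h0 : PySem.List.pyGetD w 0 0 = 1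
        · have h1ne : PySem.List.pyGetD w 1 0 ≠ 1 := fun h => hwiff (iff_of_true h0 h)
          refine ⟨PySem.List.pyGetD w 1 0, ?_, ?_, (hw w hwmem').2.2.2, ?_⟩
          · have := (hBwmem w hwmem').1
            rwa [h0] at this
          · have := (hw w hwmem').2.2.1
            omega
          · refine NBF _ ?_
            have := (hBwmem w hwmem').1
            rwa [h0] at this
        · have h1 : PySem.List.pyGetD w 1 0 = 1 := by
            by_contra h1n
            exact hwiff (iff_of_false h0 h1n)
          have h0ne : PySem.List.pyGetD w 0 0 ≠ 1 := h0
          refine ⟨PySem.List.pyGetD w 0 0, ?_, ?_, (hw w hwmem').2.1.2, ?_⟩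
          · have := (hBwmem w hwmem').2
            rwa [h1] at this
          · have := (hw w hwmem').2.1.1
            omega
          · refine NBF _ ?_
            have := (hBwmem w hwmem').2
            rwa [h1] at this
      · right; left; omega
  show solution n wires = solution_alt n wires
  simp only [solution, solution_alt]
  rw [run_eq_dfsB n (buildAdj n wires) hadm]
  exact final_agg n hn (buildAdj n wires) tree2 tF visF sizeF RK2 hBbnd RV RE hN' hC' hS' hDcases

theorem solution_changed : Claim_changed_solution := by
  unfold Claim_changed_solution; decide

theorem solution_tight : Claim_exact_solution := by
  intro n wires _ hpre hd
  obtain ⟨hn, hw⟩ := hpre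
  obtain ⟨hne, h100, hall⟩ := hd
  have hkeys0 : ((PySem.List.pyRange 0 n 1).foldl
      (fun d i => d.insert (i + 1) PySem.Dict.empty)
      (PySem.Dict.empty : PySem.Dict Int (PySem.Dict Int Int))).keys = nodesUpTo n.toNat := by
    rw [keys_fold_insert_empty _ _ (fun i _ => PySem.Dict.contains_empty _)
      (by rw [pyRange_map_succ n (by omega)]; exact nodesUpTo_nodup _)]
    rw [PySem.Dict.keys_empty, List.nil_append, pyRange_map_succ n (by omega)]
  have hgetD0 : ∀ u : Int, ((PySem.List.pyRange 0 n 1).foldl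
      (fun d i => d.insert (i + 1) PySem.Dict.empty)
      (PySem.Dict.empty : PySem.Dict Int (PySem.Dict Int Int))).getD u PySem.Dict.empty
        = PySem.Dict.empty :=
    tree0_getD _ _ (fun u => PySem.Dict.getD_empty _ _)
  have hbuild : BuildInv n (List.replicate (n + 1).toNat []) wires
      (buildTreeA n wires) (buildAdj n wires) :=
    build_fold_inv n wires _ _
      (fun w hw' => ⟨(hw w hw').2.1, (hw w hw').2.2⟩)
      hkeys0
      (fun u => by rw [hgetD0 u, getD_replicate_same, PySem.Dict.keys_empty])
      (by rw [List.length_replicate]; omega)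
      (fun u v => by unfold Entry; rw [hgetD0 u]; exact PySem.Dict.getD_empty _ _)
      (fun u x hx => absurd (by rwa [getD_replicate_same] at hx) (List.not_mem_nil))
  obtain ⟨hBk, hBK, hBlen, hBzero, hBbnd, _hBpers, hBwmem, hBorig⟩ := hbuild
  have hadm : Adm n (buildAdj n wires) := ⟨hn, hBbnd⟩
  have hadj1 : ∀ x ∈ (buildAdj n wires).getD (1 : Int).toNat [], x = 1 := by
    intro x hx
    rcases hBorig x hx with h | ⟨w, hwm, hcase⟩
    · rw [getD_replicate_same] at h
      exact absurd h (List.not_mem_nil)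
    · rcases hcase with ⟨h1, h2⟩ | ⟨h1, h2⟩
      · rw [h2]; exact (hall w hwm).1 h1
      · rw [h2]; exact (hall w hwm).2 h1
  obtain ⟨f, hf⟩ : ∃ f, n.toNat = f + 1 := ⟨n.toNat - 1, by omega⟩
  -- A's dfs marks node 1 and stops: its tree and all stored values are unchanged
  have hdfsA : dfsA (f + 1) 1 (buildTreeA n wires)
      ((PySem.List.pyRange 0 n 1).foldl (fun d i => d.insert (i + 1) false) PySem.Dict.empty)
      = (0, buildTreeA n wires,
        ((PySem.List.pyRange 0 n 1).foldl (fun d i => d.insert (i + 1) false)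
          PySem.Dict.empty).insert 1 true) := by
    simp only [dfsA]
    refine skipA _ _ _ _ _ _ ?_
    intro x hx
    rw [hBK 1] at hx
    rw [hadj1 x hx, PySem.Dict.getD_insert, if_pos rfl]
  have hdfsB : dfsB (buildAdj n wires) (f + 1) 1 (List.replicate (n + 1).toNat false)
      (List.replicate (n + 1).toNat 0)
      = (1, (List.replicate (n + 1).toNat false).set (1 : Int).toNat true,
          (List.replicate (n + 1).toNat (0 : Int)).set (1 : Int).toNat 1) := by
    simp only [dfsB]
    rw [skipB _ _ _ _ _ ?_]
    · intro x hx
      rw [hadj1 x hx]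
      exact getD_set_self _ _ (by rw [List.length_replicate]; omega) _ _
  have hA : solution n wires = n := by
    simp only [solution, hf, hdfsA]
    rw [nested_min_eq]
    set TA := (buildTreeA n wires).keys.flatMap
      (fun node => (((buildTreeA n wires).getD node PySem.Dict.empty).keys).map
        (fun key => |n - ((buildTreeA n wires).getD node PySem.Dict.empty).getD key 0
          - ((buildTreeA n wires).getD node PySem.Dict.empty).getD key 0|)) with hTA
    have hallTA : ∀ x ∈ TA, x = n := by
      intro x hx
      obtain ⟨u, hu, hx2⟩ := List.mem_flatMap.1 hx
      obtain ⟨v, hv, hveq⟩ := List.mem_map.1 hx2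
      rw [← hveq]
      have h0 : ((buildTreeA n wires).getD u PySem.Dict.empty).getD v 0 = 0 := hBzero u v
      rw [h0, show n - 0 - 0 = n from by ring]
      exact abs_of_nonneg (by omega)
    have hnmem : n ∈ TA := by
      obtain ⟨w, hwmem⟩ : ∃ w, w ∈ wires := by
        cases wires with
        | nil => exact absurd rfl hne
        | cons a l => exact ⟨a, List.mem_cons_self⟩
      have hb := hBwmem w hwmem
      have hwbd := hw w hwmem
      refine List.mem_flatMap.2 ⟨PySem.List.pyGetD w 0 0, ?_,
        List.mem_map.2 ⟨PySem.List.pyGetD w 1 0, ?_, ?_⟩⟩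
      · rw [hBk]; exact (mem_nodesUpTo _ _).2 ⟨hwbd.2.1.1, by have := hwbd.2.1.2; omega⟩
      · rw [hBK]; exact hb.1
      · have h0 : ((buildTreeA n wires).getD (PySem.List.pyGetD w 0 0)
            PySem.Dict.empty).getD (PySem.List.pyGetD w 1 0) 0 = 0 := hBzero _ _
        rw [h0, show n - 0 - 0 = n from by ring]
        exact abs_of_nonneg (by omega)
    rcases PySem.List.foldl_min_mem TA 101 with h | h
    · exfalso
      have := (PySem.List.foldl_min_le TA 101).2 _ hnmem
      omega
    · exact hallTA _ h
  have hB : solution_alt n wires = 101 := by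
    simp only [solution_alt]
    rw [run_eq_dfsB n (buildAdj n wires) hadm, hf, hdfsB]
    rw [b_fold_eq]
    rw [show (PySem.List.pyRange 2 (n + 1) 1).filter
        (fun v => ((List.replicate (n + 1).toNat false).set (1 : Int).toNat true).getD
          v.toNat false) = [] from ?_]
    · rfl
    · rw [List.filter_eq_nil_iff]
      intro v hv
      have hv2 := PySem.List.mem_pyRange_one.1 hv
      rw [getD_set_toNat_ne _ _ _ (by omega) (by omega), getD_replicate_same]
      simp
  rw [hA, hB]
  omega
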